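-- pv_equiv track=rewrite | github.com/Osa-sergey/agent_bang | analyze.py | clear_users_role
-- ===== SOURCE A (Python) =====
-- def clear_users_role(users_role_raw, stat):
--     names = [name for name in stat.keys()]
--     users_role_clear = dict()
--     for name in names:
--         role = users_role_raw.get(name, "")
--         if role:
--             role = role.lower()
--             if role in ["sherif", "renegade", "bandits", "bandit", "sherif_assistant"]:
--                 if role == "bandits":
--                     role = "bandit"
--                 users_role_clear[name] = role
--             if role == "deputies":
--                 users_role_clear[name] = "sherif_assistant"
--     return users_role_clear
-- ===== SOURCE B (Python) =====
-- ROLE_MAP = {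
--     "sherif": "sherif",
--     "renegade": "renegade",
--     "bandit": "bandit",
--     "sherif_assistant": "sherif_assistant",
--     "bandits": "bandit",
--     "deputies": "sherif_assistant",
-- }
--
--
-- def clear_users_role(users_role_raw, stat):
--     # Stage 1: normalize the whole raw role dict once.
--     normalized = {}
--     for name, role in users_role_raw.items():
--         if role:
--             mapped = ROLE_MAP.get(role.lower())
--             if mapped is not None:
--                 normalized[name] = mapped
--     # Stage 2: project the normalized dict onto stat's keys.
--     return {name: normalized[name] for name in stat if name in normalized}
-- ===== Notes on version B (the rewrite author's own statement) =====
-- stated objective: alternative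
-- what changed: Inverts the traversal: instead of A's single pass over stat's keys with a per-name branch chain, B first normalizes the entire users_role_raw dict into a clean table in one pass (one ROLE_MAP lookup per entry) and then projects that table onto stat's keys with a dict comprehension.
import Mathlib
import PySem

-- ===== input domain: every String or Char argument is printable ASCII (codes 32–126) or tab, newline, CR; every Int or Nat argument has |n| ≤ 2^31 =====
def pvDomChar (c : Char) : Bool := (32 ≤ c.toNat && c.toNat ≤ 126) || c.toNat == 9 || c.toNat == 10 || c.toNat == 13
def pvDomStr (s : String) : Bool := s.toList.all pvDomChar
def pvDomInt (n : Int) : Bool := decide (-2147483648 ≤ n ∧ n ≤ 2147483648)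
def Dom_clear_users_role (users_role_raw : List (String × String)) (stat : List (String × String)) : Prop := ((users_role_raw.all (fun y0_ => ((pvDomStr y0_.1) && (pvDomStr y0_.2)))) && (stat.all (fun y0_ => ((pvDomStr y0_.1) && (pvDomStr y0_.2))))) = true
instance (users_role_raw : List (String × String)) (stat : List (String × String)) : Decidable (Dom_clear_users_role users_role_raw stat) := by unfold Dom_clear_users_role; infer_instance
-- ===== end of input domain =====

-- B inverts the traversal: it first normalizes the whole users_role_raw dict into a
-- clean table in one pass, then projects that table onto stat's keys (objective: alternative).

-- ===== PORT A =====
-- literal transliteration of A: scan stat's keys, look each name up in users_role_raw,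
-- test membership in the literal valid-role list, rewrite "bandits" and "deputies".
def clear_users_role (users_role_raw : List (String × String)) (stat : List (String × String)) : List (String × String) :=
  let names := (PySem.Dict.mk stat).keys
  (names.foldl (fun d name =>
    let role := (PySem.Dict.mk users_role_raw).getD name ""
    if role ≠ "" then
      let role1 := PySem.Str.lower role
      let d1 :=
        if role1 ∈ ["sherif", "renegade", "bandits", "bandit", "sherif_assistant"] then
          d.insert name (if role1 = "bandits" then "bandit" else role1)
        else d
      -- 'role' after the first branch (only "bandits" was rewritten, to "bandit")
      let role2 :=
        if role1 ∈ ["sherif", "renegade", "bandits", "bandit", "sherif_assistant"] then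
          (if role1 = "bandits" then "bandit" else role1)
        else role1
      if role2 = "deputies" then d1.insert name "sherif_assistant" else d1
    else d) (PySem.Dict.empty)).items

-- ===== PORT B =====
def roleMap : PySem.Dict String String :=
  PySem.Dict.mk [("sherif", "sherif"), ("renegade", "renegade"), ("bandit", "bandit"),
                 ("sherif_assistant", "sherif_assistant"), ("bandits", "bandit"),
                 ("deputies", "sherif_assistant")]

-- stage 1 of Source B: normalize the whole raw role dict once
def normalizeRaw (users_role_raw : List (String × String)) : PySem.Dict String String :=
  (PySem.Dict.mk users_role_raw).items.foldl (fun d p =>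
    if p.2 ≠ "" then
      match roleMap.get? (PySem.Str.lower p.2) with
      | some m => d.insert p.1 m
      | none => d
    else d) PySem.Dict.empty

def clear_users_role_alt (users_role_raw : List (String × String)) (stat : List (String × String)) : List (String × String) :=
  let normalized := normalizeRaw users_role_raw
  -- stage 2 of Source B: {name: normalized[name] for name in stat if name in normalized}
  ((PySem.Dict.mk stat).keys.foldl (fun d name =>
    match normalized.get? name with
    | some v => d.insert name v
    | none => d) PySem.Dict.empty).items

-- ===== PRECONDITION & SPEC =====
-- Pre_ excludes association lists whose raw-role dict has duplicate keys: such lists do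
-- not represent any Python dict (Python dict keys are unique), so no Python input is lost.
def Pre_clear_users_role (users_role_raw : List (String × String)) (stat : List (String × String)) : Prop :=
  (users_role_raw.map Prod.fst).Nodup
instance (users_role_raw : List (String × String)) (stat : List (String × String)) : Decidable (Pre_clear_users_role users_role_raw stat) := by unfold Pre_clear_users_role; infer_instance
def pvWitness_clear_users_role : (List (String × String)) × (List (String × String)) :=
  ([("ann", "Bandits"), ("bob", "deputies"), ("cid", "outlaw")], [("ann", "3"), ("bob", "1"), ("dee", "0")])
def Spec_clear_users_role (users_role_raw : List (String × String)) (stat : List (String × String)) (out : List (String × String)) : Prop := out = clear_users_role_alt users_role_raw stat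
instance (users_role_raw : List (String × String)) (stat : List (String × String)) (out : List (String × String)) : Decidable (Spec_clear_users_role users_role_raw stat out) := by unfold Spec_clear_users_role; infer_instance

-- ===== CLAIM (what is proved, stated in full; the proofs are below) =====
def Claim_equal_clear_users_role : Prop := ∀ (users_role_raw : List (String × String)) (stat : List (String × String)), Dom_clear_users_role users_role_raw stat → Pre_clear_users_role users_role_raw stat → Spec_clear_users_role users_role_raw stat (clear_users_role users_role_raw stat)

-- ===== LEMMAS AND PROOFS =====

-- the step function of B's normalization fold, named for the lemmas
def bStep (d : PySem.Dict String String) (p : String × String) : PySem.Dict String String :=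
  if p.2 ≠ "" then
    match roleMap.get? (PySem.Str.lower p.2) with
    | some m => d.insert p.1 m
    | none => d
  else d

theorem normalizeRaw_eq (l : List (String × String)) :
    normalizeRaw l = l.foldl bStep PySem.Dict.empty := rfl

-- what one name looks up in the stage-1 fold, for raw lists with unique keys
theorem normFold_get (l : List (String × String)) (name : String)
    (hnd : (l.map Prod.fst).Nodup) :
    ∀ d : PySem.Dict String String,
    (l.foldl bStep d).get? name =
      (match (PySem.Dict.mk l).get? name with
       | none => d.get? name
       | some role =>
         if role ≠ "" then
           match roleMap.get? (PySem.Str.lower role) with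
           | some m => some m
           | none => d.get? name
         else d.get? name) := by
  induction l with
  | nil => intro d; simp [PySem.Dict.get?]
  | cons p t ih =>
    intro d
    obtain ⟨k, v⟩ := p
    simp only [List.map_cons, List.nodup_cons] at hnd
    have ih' := ih hnd.2
    simp only [List.foldl_cons, ih']
    by_cases hk : k = name
    · subst hk
      have ht : (PySem.Dict.mk t).get? k = none := by
        rw [PySem.Dict.get?_eq_none_iff_not_mem_keys]
        simpa [PySem.Dict.keys, PySem.Dict.items] using hnd.1
      rw [ht]
      rw [PySem.Dict.get?_mk_cons]
      simp only [BEq.rfl, if_true]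
      by_cases hv : v = ""
      · simp [bStep, hv]
      · simp only [bStep, ne_eq, hv, not_false_eq_true, if_true]
        cases hm : roleMap.get? (PySem.Str.lower v) with
        | some m => simp [PySem.Dict.get?_insert_self]
        | none => rfl
    · have hstep : (bStep d (k, v)).get? name = d.get? name := by
        unfold bStep
        by_cases hv : v = ""
        · simp [hv]
        · simp only [ne_eq, hv, not_false_eq_true, if_true]
          cases roleMap.get? (PySem.Str.lower v) with
          | some m =>
            rw [PySem.Dict.get?_insert_of_ne]
            exact fun h => hk h.symm
          | none => rfl
      rw [PySem.Dict.get?_mk_cons]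
      have hkb : (k == name) = false := by simp [hk]
      rw [hkb]
      simp only [Bool.false_eq_true, if_false, hstep]

-- the per-name loop step of each port agrees, given unique raw keys
theorem step_eq (users_role_raw : List (String × String))
    (hnd : (users_role_raw.map Prod.fst).Nodup)
    (d : PySem.Dict String String) (name : String) :
    (let role := (PySem.Dict.mk users_role_raw).getD name ""
     if role ≠ "" then
       let role1 := PySem.Str.lower role
       let d1 :=
         if role1 ∈ ["sherif", "renegade", "bandits", "bandit", "sherif_assistant"] then
           d.insert name (if role1 = "bandits" then "bandit" else role1)
         else d
       let role2 :=
         if role1 ∈ ["sherif", "renegade", "bandits", "bandit", "sherif_assistant"] then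
           (if role1 = "bandits" then "bandit" else role1)
         else role1
       if role2 = "deputies" then d1.insert name "sherif_assistant" else d1
     else d) =
    (match (normalizeRaw users_role_raw).get? name with
     | some v => d.insert name v
     | none => d) := by
  have hnorm := (normFold_get users_role_raw name hnd) PySem.Dict.empty
  rw [PySem.Dict.get?_empty] at hnorm
  rw [normalizeRaw_eq, hnorm]
  rw [PySem.Dict.getD_eq_get?_getD]
  cases hget : (PySem.Dict.mk users_role_raw).get? name with
  | none => simp
  | some r =>
    simp only [Option.getD_some]
    by_cases h0 : r = ""
    · simp [h0]
    · simp only [ne_eq, h0, not_false_eq_true, if_true]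
      generalize PySem.Str.lower r = rl
      by_cases h1 : rl = "sherif" <;> by_cases h2 : rl = "renegade" <;>
        by_cases h3 : rl = "bandits" <;> by_cases h4 : rl = "bandit" <;>
        by_cases h5 : rl = "sherif_assistant" <;> by_cases h6 : rl = "deputies" <;>
        simp_all [roleMap, PySem.Dict.get?_mk_cons]
      -- leftover case: rl matches no table key, both sides leave d unchanged
      simp [PySem.Dict.get?, Ne.symm h1, Ne.symm h2, Ne.symm h3, Ne.symm h4, Ne.symm h5, Ne.symm h6]

theorem clear_users_role_spec' (users_role_raw stat : List (String × String))
    (hnd : (users_role_raw.map Prod.fst).Nodup) :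
    clear_users_role users_role_raw stat = clear_users_role_alt users_role_raw stat := by
  unfold clear_users_role clear_users_role_alt
  dsimp only
  congr 2
  funext d name
  have h := step_eq users_role_raw hnd d name
  dsimp only at h
  exact h

-- ===== VERDICT (by name: the statement is the Claim_ definition above) =====
theorem clear_users_role_spec : Claim_equal_clear_users_role := by
  intro u s _ hpre
  exact clear_users_role_spec' u s hpre
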